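/- GENERATED by tools/from_farm_form.py from farm/worked/__asan_register_globals/Lemmas.lean (a worked proof of the farm's unit `__asan_register_globals`,
   accepted by the verdict) — do not edit. -/
import Toy.Spec.Units.asan_register_globals
/-
  PURE FACTS ABOUT THE STORE SEQUENCES OF `__asan_register_globals` (Asan/Objects.lean: `fillMem`, `registerOne`, `registerMem`),
  as the walk of the unit `__asan_register_globals` needs them: one more store at the END of a fill (the inner loop's back edge),
  one more descriptor at the END of the table (the outer loop's back edge), and "a registration writes shadow bytes only"
  (the return address, the descriptor table and the footprint of the contract); and the bit facts of the routine's address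
  arithmetic (`and rax, -8`, `test dl, 7`, `and edx, 7`, `shl rax, 6`, the one-byte store through `shr 3 ; + C00000H`).
-/

namespace Toy.Spec.Proved.asan_register_globals
open Toy.Spec.asan_register_globals (Statement)
open X86 X86.User Asan

/-- **One more store at the end of a fill**: `k + 1` stores are `k` stores, then the store at granule `g + k` (the definition
peels the FIRST store off; the loop of the routine adds the LAST one). -/
theorem fillMem_succ_end_w (mem : Mem) (g : Nat) (v : Byte) (k : Nat) :
    fillMem mem g v (k + 1) = (fillMem mem g v k).write (shadowAddr (g + k)) v := by
  induction k generalizing mem g with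
  | zero => rfl
  | succ k ih =>
    show fillMem (mem.write (shadowAddr g) v) (g + 1) v (k + 1) =
      (fillMem (mem.write (shadowAddr g) v) (g + 1) v k).write (shadowAddr (g + (k + 1))) v
    rw [ih]
    have e : g + 1 + k = g + (k + 1) := by omega
    rw [e]

/-- **One more descriptor at the end of the table**: the memory after the first `i + 1` descriptors is `registerOne` of the
memory after the first `i`. -/
theorem registerMem_take_succ_w (mem : Mem) (ds : List GlobalDesc) (i : Nat) (h : i < ds.length) :
    registerMem mem (ds.take (i + 1)) = registerOne (registerMem mem (ds.take i)) ds[i] := by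
  unfold registerMem
  rw [List.take_succ_eq_append_getElem h, List.foldl_append]
  rfl

/-- The stores for one sane descriptor go to the shadow bytes of its slot only. -/
theorem registerOne_sameExcept_w (mem : Mem) (d : GlobalDesc) (hd : d.OK) :
    Mem.SameExcept [shadowSpan d.beg (d.beg + d.sizeRz)] mem (registerOne mem d) := by
  obtain ⟨h1, h2, h3, h4, h5⟩ := hd
  intro a ha
  have ha' := ha (shadowSpan d.beg (d.beg + d.sizeRz)) List.mem_cons_self
  unfold shadowSpan at ha'
  simp only at ha'
  unfold registerOne
  rw [fillMem_read_other _ _ _ _ a (by omega) (by omega)]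
  by_cases he : (d.beg + d.size) % 8 = 0
  · rw [if_pos he]
  · rw [if_neg he]
    apply Mem.read_write_other
    intro e
    have := shadowAddr_toNat ((d.beg + d.size) / 8) (by omega)
    rw [e] at this
    omega

/-- **The footprint of a registration** is what the contract declares: the shadow of every slot (`registerWrites`). -/
theorem registerMem_sameExcept_w (mem : Mem) (ds : List GlobalDesc) (hok : ∀ d, d ∈ ds → d.OK) :
    Mem.SameExcept (registerWrites ds) mem (registerMem mem ds) := by
  induction ds generalizing mem with
  | nil => exact Mem.SameExcept.refl _ _
  | cons d ds ih =>
    have e : registerMem mem (d :: ds) = registerMem (registerOne mem d) ds := rfl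
    rw [e]
    have h1 : Mem.SameExcept (registerWrites (d :: ds)) mem (registerOne mem d) := by
      apply (registerOne_sameExcept_w mem d (hok d List.mem_cons_self)).mono
      intro w hw a ha1 ha2
      refine ⟨w, ?_, ha1, ha2⟩
      rw [List.mem_singleton] at hw
      rw [hw]
      exact List.mem_cons_self
    have h2 : Mem.SameExcept (registerWrites (d :: ds)) (registerOne mem d) (registerMem (registerOne mem d) ds) := by
      apply (ih (registerOne mem d) (fun d' hd' => hok d' (List.mem_cons_of_mem _ hd'))).mono
      intro w hw a ha1 ha2
      exact ⟨w, List.mem_cons_of_mem _ hw, ha1, ha2⟩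
    exact h1.trans h2

/-- A registration leaves everything below the shadow as it was. -/
theorem registerMem_eqOn_low_w (mem : Mem) (ds : List GlobalDesc) (hok : ∀ d, d ∈ ds → d.OK) :
    Mem.EqOn 0 0xC00000 mem (registerMem mem ds) := by
  apply (registerMem_sameExcept_w mem ds hok).eqOn
  intro w hw
  unfold registerWrites at hw
  obtain ⟨d, _, hd⟩ := List.mem_map.mp hw
  rw [← hd]
  unfold shadowSpan
  simp only
  omega

/-- **A load below the shadow reads through a registration** (the return address on the stack, the descriptor table). -/
theorem readLE_registerMem_w (mem : Mem) (ds : List GlobalDesc) (hok : ∀ d, d ∈ ds → d.OK) (a : Word) (k : Nat)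
    (h : a.toNat + k ≤ 0xC00000) : (registerMem mem ds).readLE a k = mem.readLE a k :=
  (registerMem_eqOn_low_w mem ds hok).readLE a k (Nat.zero_le _) h (by omega)

/-- The first descriptors of a sane table are sane. -/
theorem ok_take_w {ds : List GlobalDesc} (hok : ∀ d, d ∈ ds → d.OK) (i : Nat) : ∀ d, d ∈ ds.take i → d.OK :=
  fun d hd => hok d (List.mem_of_mem_take hd)

/-! ### Bit facts of the address arithmetic -/

/-- Clearing the low three bits is `>>> 3` then `<<< 3` (a closed bit-vector fact). -/
theorem bv_and_neg8_w (x : BitVec 64) : x &&& 18446744073709551608#64 = (x >>> 3) <<< 3 := by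
  bv_decide

/-- `and rax, -8` rounds down to a multiple of 8. -/
theorem toNat_and_neg8_w (x : Word) : (x &&& 18446744073709551608).toNat = x.toNat / 8 * 8 := by
  have h := congrArg BitVec.toNat (bv_and_neg8_w x.toBitVec)
  rw [BitVec.toNat_shiftLeft, BitVec.toNat_ushiftRight, Nat.shiftLeft_eq, Nat.shiftRight_eq_div_pow] at h
  have hlt := x.toNat_lt
  show (x.toBitVec &&& 18446744073709551608#64).toNat = _
  rw [h]
  show x.toNat / 2 ^ 3 * 2 ^ 3 % 2 ^ 64 = _
  omega

/-- `test dl, 7`: the low three bits of the low byte are the number modulo 8. -/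
theorem test7_toNat_w (x : Word) : (Word.part Width.w8 x &&& 7#8).toNat = x.toNat % 8 := by
  unfold Word.part
  simp only [Width.bits, BitVec.toNat_and, BitVec.toNat_setWidth, UInt64.toNat_toBitVec]
  show x.toNat % 2 ^ 8 &&& 2 ^ 3 - 1 = _
  rw [Nat.and_two_pow_sub_one_eq_mod]
  omega

/-- `and edx, 7 ; mov [..], dl`: the byte stored is the number modulo 8. -/
theorem and7_byte_w (x : Word) : (BitVec.setWidth 8 (Word.part Width.w32 x &&& 7#32)).toNat = x.toNat % 8 := by
  unfold Word.part
  simp only [Width.bits, BitVec.toNat_and, BitVec.toNat_setWidth, UInt64.toNat_toBitVec]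
  show (x.toNat % 2 ^ 32 &&& 2 ^ 3 - 1) % 2 ^ 8 = _
  rw [Nat.and_two_pow_sub_one_eq_mod]
  omega

/-- The address of the `k`-th word of descriptor `i` of the table at 141900H, as the code computes it (`shl 6`, `add`). -/
theorem desc_addr_w (i : Nat) (hi : i < 3) (k : Nat) :
    UInt64.ofNat i <<< 6 + UInt64.ofNat (1317120 + k) = UInt64.ofNat (1317120 + 64 * i + k) := by
  have h : i = 0 ∨ i = 1 ∨ i = 2 := by omega
  have h6 : UInt64.ofNat i <<< 6 = UInt64.ofNat (64 * i) := by
    rcases h with rfl | rfl | rfl <;> decide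
  have e : 1317120 + 64 * i + k = 64 * i + (1317120 + k) := by omega
  rw [h6, e]
  exact (UInt64.ofNat_add _ _).symm

/-- `lea rax, [rdx + 7] ; and rax, -8` on the number `e`: `e` rounded up to a multiple of 8. -/
theorem round8_ofNat_w (e : Nat) (h : e + 7 < 2 ^ 64) :
    (UInt64.ofNat e + 7) &&& 18446744073709551608 = UInt64.ofNat ((e + 7) / 8 * 8) := by
  apply UInt64.toNat_inj.mp
  rw [toNat_and_neg8_w]
  have e1 : (UInt64.ofNat e + 7).toNat = e + 7 := by
    rw [show (7 : UInt64) = UInt64.ofNat 7 from rfl, ← UInt64.ofNat_add, UInt64.toNat_ofNat', Nat.mod_eq_of_lt h]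
  rw [e1, UInt64.toNat_ofNat']
  omega

/-- `test dl, 7` on the number `e`. -/
theorem test7_ofNat_w (e : Nat) (h : e < 2 ^ 64) : (Word.part Width.w8 (UInt64.ofNat e) &&& 7#8).toNat = e % 8 := by
  rw [test7_toNat_w, UInt64.toNat_ofNat', Nat.mod_eq_of_lt h]

/-- The byte `and edx, 7` leaves of the number `e`. -/
theorem and7_ofNat_w (e : Nat) (h : e < 2 ^ 64) :
    (BitVec.setWidth 8 (Word.part Width.w32 (UInt64.ofNat e) &&& 7#32)).toNat = e % 8 := by
  rw [and7_byte_w, UInt64.toNat_ofNat', Nat.mod_eq_of_lt h]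

/-- **A one-byte store through `shr 3 ; + C00000H`** is the store to the shadow byte of the address's granule, in the
vocabulary of `fillMem` / `registerOne` (`Mem.write` at `shadowAddr`). -/
theorem store_shadow_byte_w (m : Mem) (x v : Nat) (hx : x < 0x1000000) (hv : v < 256) :
    m.writeLE (UInt64.ofNat x >>> 3 + 12582912) 1 v = m.write (shadowAddr (x / 8)) (UInt8.ofNat v) := by
  have ea : UInt64.ofNat x >>> 3 + 12582912 = shadowAddr (x / 8) := by
    apply eq_shadowAddr
    have e3 : (UInt64.ofNat x >>> 3).toNat = x / 8 := by
      rw [Asan.toNat_shr3, UInt64.toNat_ofNat']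
      omega
    have ec : (12582912 : UInt64) = UInt64.ofNat 12582912 := rfl
    rw [ec, toNat_add_ofNat _ _ (by omega), e3]
    omega
  rw [Mem.writeLE_one, Nat.mod_eq_of_lt hv, ea]

end Toy.Spec.Proved.asan_register_globals
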